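-- pv_equiv track=rewrite | github.com/witlox/agile-agent-team | src/orchestrator/sprint_manager.py | _parse_retro_response
-- ===== SOURCE A (Python) =====
-- from typing import Dict, List, Optional, Tuple
--
-- def _parse_retro_response(text: str) -> Tuple[str, str, str]:
--     """Extract KEEP / DROP / PUZZLE from agent response."""
--     keep = drop = puzzle = ""
--     for line in text.splitlines():
--         line = line.strip()
--         if line.upper().startswith("KEEP:"):
--             keep = line[5:].strip()
--         elif line.upper().startswith("DROP:"):
--             drop = line[5:].strip()
--         elif line.upper().startswith("PUZZLE:"):
--             puzzle = line[7:].strip()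
--     # Fallback: if format not followed, use whole response as keep
--     if not keep and not drop and not puzzle:
--         keep = text.strip()
--     return keep, drop, puzzle
-- ===== SOURCE B (Python) =====
-- def _parse_retro_response(text: str):
--     """Extract KEEP / DROP / PUZZLE from agent response."""
--     lines = [line.strip() for line in text.splitlines()]
--
--     def last_match(prefix):
--         result = ""
--         for line in lines:
--             if line.upper().startswith(prefix):
--                 result = line[len(prefix):].strip()
--         return result
--
--     keep = last_match("KEEP:")
--     drop = last_match("DROP:")
--     puzzle = last_match("PUZZLE:")
--     if not keep and not drop and not puzzle:
--         keep = text.strip()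
--     return keep, drop, puzzle
-- ===== Notes on version B (the rewrite author's own statement) =====
-- stated objective: alternative
-- what changed: Replaces the single stateful three-branch dispatch loop by pre-stripping the lines once and running a reusable last_match(prefix) scan per field (three independent passes), keeping the same fallback.
import Mathlib
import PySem

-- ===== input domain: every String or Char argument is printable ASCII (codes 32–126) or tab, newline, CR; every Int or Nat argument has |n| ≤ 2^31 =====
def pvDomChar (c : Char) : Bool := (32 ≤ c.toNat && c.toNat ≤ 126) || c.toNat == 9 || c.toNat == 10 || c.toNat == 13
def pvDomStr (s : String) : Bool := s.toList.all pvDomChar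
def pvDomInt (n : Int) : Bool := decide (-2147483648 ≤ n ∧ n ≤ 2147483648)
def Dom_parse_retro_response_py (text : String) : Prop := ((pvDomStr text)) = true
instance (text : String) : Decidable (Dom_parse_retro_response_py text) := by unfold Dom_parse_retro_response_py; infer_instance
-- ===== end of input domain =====

-- B re-decomposes A: stripped lines precomputed once, one reusable last-match scan per prefix; same fallback. Alternative decomposition, same cost.

-- ===== PORT A =====
-- A's loop body ('line = line.strip()' inlined as 'strip line'); the fold carries (keep, drop, puzzle)
def pvStepA (st : String × String × String) (line : String) : String × String × String :=
  if PySem.Str.startswith (PySem.Str.upper (PySem.Str.strip line)) "KEEP:" then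
    (PySem.Str.strip (PySem.Str.slice (PySem.Str.strip line) (some 5) none), st.2.1, st.2.2)
  else if PySem.Str.startswith (PySem.Str.upper (PySem.Str.strip line)) "DROP:" then
    (st.1, PySem.Str.strip (PySem.Str.slice (PySem.Str.strip line) (some 5) none), st.2.2)
  else if PySem.Str.startswith (PySem.Str.upper (PySem.Str.strip line)) "PUZZLE:" then
    (st.1, st.2.1, PySem.Str.strip (PySem.Str.slice (PySem.Str.strip line) (some 7) none))
  else st

def parse_retro_response_py (text : String) : String × String × String :=
  let res := (PySem.Str.splitlines text).foldl pvStepA ("", "", "")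
  if res.1 = "" ∧ res.2.1 = "" ∧ res.2.2 = "" then (PySem.Str.strip text, res.2.1, res.2.2)
  else res

-- ===== PORT B =====
-- body of B's last_match loop
def pvMatchStep (pre : String) (result line : String) : String :=
  if PySem.Str.startswith (PySem.Str.upper line) pre then
    PySem.Str.strip (PySem.Str.slice line (some (PySem.Str.len pre : Int)) none)
  else result

def pvLastMatch (lines : List String) (pre : String) : String :=
  lines.foldl (pvMatchStep pre) ""

def parse_retro_response_py_alt (text : String) : String × String × String :=
  let lines := (PySem.Str.splitlines text).map PySem.Str.strip
  let keep := pvLastMatch lines "KEEP:"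
  let drop := pvLastMatch lines "DROP:"
  let puzzle := pvLastMatch lines "PUZZLE:"
  if keep = "" ∧ drop = "" ∧ puzzle = "" then (PySem.Str.strip text, drop, puzzle)
  else (keep, drop, puzzle)

-- ===== PRECONDITION & SPEC =====
def Spec_parse_retro_response_py (text : String) (out : String × String × String) : Prop := out = parse_retro_response_py_alt text
instance (text : String) (out : String × String × String) : Decidable (Spec_parse_retro_response_py text out) := by unfold Spec_parse_retro_response_py; infer_instance

-- ===== CLAIM (what is proved, stated in full; the proofs are below) =====
def Claim_equal_parse_retro_response_py : Prop := ∀ (text : String), Dom_parse_retro_response_py text → Spec_parse_retro_response_py text (parse_retro_response_py text)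

-- ===== LEMMAS AND PROOFS =====

-- two prefixes with different first characters cannot both be prefixes of s
lemma sw_excl (s : String) (a b : Char) (p q : List Char) (hab : a ≠ b)
    (hp : PySem.Chars.startswith s.toList (a :: p) = true) :
    PySem.Chars.startswith s.toList (b :: q) = false := by
  rw [Bool.eq_false_iff]
  intro hq
  rw [PySem.Chars.startswith_iff] at hp hq
  rcases hp with ⟨t, ht⟩
  rcases hq with ⟨u, hu⟩
  rw [← ht] at hu
  simp only [List.cons_append, List.cons.injEq] at hu
  exact hab hu.1.symm

lemma swKD (s : String) (h : PySem.Str.startswith s "KEEP:" = true) :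
    PySem.Str.startswith s "DROP:" = false := by
  simp only [PySem.Str.startswith_eq] at h ⊢
  exact sw_excl s 'K' 'D' "EEP:".toList "ROP:".toList (by decide) h

lemma swKP (s : String) (h : PySem.Str.startswith s "KEEP:" = true) :
    PySem.Str.startswith s "PUZZLE:" = false := by
  simp only [PySem.Str.startswith_eq] at h ⊢
  exact sw_excl s 'K' 'P' "EEP:".toList "UZZLE:".toList (by decide) h

lemma swDP (s : String) (h : PySem.Str.startswith s "DROP:" = true) :
    PySem.Str.startswith s "PUZZLE:" = false := by
  simp only [PySem.Str.startswith_eq] at h ⊢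
  exact sw_excl s 'D' 'P' "ROP:".toList "UZZLE:".toList (by decide) h

-- A's combined fold decomposes into B's three independent last-match folds over the stripped lines
lemma fold_decomp (L : List String) (k d p : String) :
    L.foldl pvStepA (k, d, p) =
    ((L.map PySem.Str.strip).foldl (pvMatchStep "KEEP:") k,
     (L.map PySem.Str.strip).foldl (pvMatchStep "DROP:") d,
     (L.map PySem.Str.strip).foldl (pvMatchStep "PUZZLE:") p) := by
  induction L generalizing k d p with
  | nil => rfl
  | cons l L ih =>
    have e5 : (PySem.Str.len "KEEP:" : Int) = 5 := by decide
    have e5' : (PySem.Str.len "DROP:" : Int) = 5 := by decide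
    have e7 : (PySem.Str.len "PUZZLE:" : Int) = 7 := by decide
    simp only [List.map_cons, List.foldl_cons, pvStepA, pvMatchStep, e5, e5', e7]
    by_cases h1 : PySem.Str.startswith (PySem.Str.upper (PySem.Str.strip l)) "KEEP:" = true
    · rw [if_pos h1, if_pos h1, if_neg (by rw [swKD _ h1]; exact Bool.false_ne_true), if_neg (by rw [swKP _ h1]; exact Bool.false_ne_true), ih]
    · rw [if_neg h1, if_neg h1]
      by_cases h2 : PySem.Str.startswith (PySem.Str.upper (PySem.Str.strip l)) "DROP:" = true
      · rw [if_pos h2, if_pos h2, if_neg (by rw [swDP _ h2]; exact Bool.false_ne_true), ih]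
      · rw [if_neg h2, if_neg h2]
        by_cases h3 : PySem.Str.startswith (PySem.Str.upper (PySem.Str.strip l)) "PUZZLE:" = true
        · rw [if_pos h3, if_pos h3, ih]
        · rw [if_neg h3, if_neg h3, ih]

-- ===== VERDICT (by name: the statement is the Claim_ definition above) =====
theorem parse_retro_response_py_spec : Claim_equal_parse_retro_response_py := by
  intro text _
  show parse_retro_response_py text = parse_retro_response_py_alt text
  simp only [parse_retro_response_py, parse_retro_response_py_alt, pvLastMatch,
    fold_decomp (PySem.Str.splitlines text) "" "" ""]
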